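-- pv_equiv track=rewrite | github.com/felipesilva023/flask_app | exemplos/Exemplo18.py | print_vowels
-- ===== SOURCE A (Python) =====
-- def print_vowels(phrase: str) -> list:
--     vowels = ['a', 'e', 'i', 'o', 'u']
--     found = []
--     for letter in phrase:
--         if letter in vowels:
--             if letter not in found:
--                 found.append(letter)
--     return found
-- ===== SOURCE B (Python) =====
-- def print_vowels(phrase: str) -> list:
--     pairs = []
--     for vowel in 'aeiou':
--         position = phrase.find(vowel)
--         if position != -1:
--             pairs.append((position, vowel))
--     pairs.sort(key=lambda pair: pair[0])
--     return [vowel for position, vowel in pairs]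
-- ===== Notes on version B (the rewrite author's own statement) =====
-- stated objective: faster
-- what changed: Instead of scanning the phrase character by character and deduplicating into an accumulator, B computes each vowel's first occurrence with str.find, keeps the found (position, vowel) pairs, sorts them by position and returns the vowels; distinct vowels have distinct first-occurrence positions, so the order matches A's first-appearance order.
import Mathlib
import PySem

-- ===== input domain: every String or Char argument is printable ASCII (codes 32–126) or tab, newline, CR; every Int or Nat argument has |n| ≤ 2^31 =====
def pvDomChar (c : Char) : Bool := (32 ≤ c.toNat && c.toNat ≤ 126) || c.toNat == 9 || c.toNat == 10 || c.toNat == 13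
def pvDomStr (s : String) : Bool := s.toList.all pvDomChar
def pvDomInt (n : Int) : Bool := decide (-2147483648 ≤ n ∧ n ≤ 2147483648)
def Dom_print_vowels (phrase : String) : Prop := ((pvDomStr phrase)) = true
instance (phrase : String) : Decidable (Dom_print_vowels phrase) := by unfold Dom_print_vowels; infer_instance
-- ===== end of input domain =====

-- B replaces A's scan-and-dedup of the phrase by indexing each of the five vowels with str.find
-- and sorting the found (position, vowel) pairs by position (objective: faster, measured; C-level find vs per-char loop).

-- ===== PORT A =====
def print_vowels (phrase : String) : List String :=
  let vowels : List String := ["a", "e", "i", "o", "u"]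
  phrase.toList.foldl (fun found letter =>
    if String.singleton letter ∈ vowels then
      if String.singleton letter ∈ found then found
      else found ++ [String.singleton letter]
    else found) []

-- ===== PORT B =====
def print_vowels_alt (phrase : String) : List String :=
  let pairs : List (Int × String) :=
    (["a", "e", "i", "o", "u"]).foldl (fun pairs vowel =>
      if PySem.Str.find phrase vowel ≠ -1 then
        pairs ++ [(PySem.Str.find phrase vowel, vowel)]
      else pairs) []
  (PySem.List.sorted pairs (fun pair => pair.1)).map (fun pair => pair.2)

-- ===== PRECONDITION & SPEC =====
def Spec_print_vowels (phrase : String) (out : List String) : Prop := out = print_vowels_alt phrase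
instance (phrase : String) (out : List String) : Decidable (Spec_print_vowels phrase out) := by unfold Spec_print_vowels; infer_instance

-- ===== CLAIM (what is proved, stated in full; the proofs are below) =====
def Claim_equal_print_vowels : Prop := ∀ (phrase : String), Dom_print_vowels phrase → Spec_print_vowels phrase (print_vowels phrase)

-- ===== LEMMAS AND PROOFS =====

/-- The five vowel characters. -/
def vchars : List Char := ['a', 'e', 'i', 'o', 'u']

/-- Common specification of both programs: the distinct vowels of `l` in first-appearance order. -/
def dedupV : List Char → List Char
  | [] => []
  | c :: t => if c ∈ vchars then c :: (dedupV t).filter (fun x => x ≠ c) else dedupV t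

theorem singleton_mem_vowels (c : Char) :
    (String.singleton c ∈ (["a", "e", "i", "o", "u"] : List String)) ↔ c ∈ vchars := by
  simp only [vchars, List.mem_cons, List.not_mem_nil, or_false, String.ext_iff]
  simp [String.singleton]

theorem singleton_mem_map (c : Char) (l : List Char) :
    (String.singleton c ∈ l.map String.singleton) ↔ c ∈ l := by
  simp only [List.mem_map]
  constructor
  · rintro ⟨x, hx, he⟩
    have h2 := congrArg String.toList he
    simp only [String.toList_singleton] at h2
    rwa [← List.singleton_inj.1 h2]
  · exact fun h => ⟨c, h, rfl⟩

/-- Char-level model of A's loop step. -/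
def stepC (found : List Char) (c : Char) : List Char :=
  if c ∈ vchars then (if c ∈ found then found else found ++ [c]) else found

theorem foldA_map (l : List Char) (acc : List Char) :
    l.foldl (fun found letter =>
      if String.singleton letter ∈ (["a", "e", "i", "o", "u"] : List String) then
        if String.singleton letter ∈ found then found
        else found ++ [String.singleton letter]
      else found) (acc.map String.singleton)
    = (l.foldl stepC acc).map String.singleton := by
  induction l generalizing acc with
  | nil => rfl
  | cons c t ih =>
    simp only [List.foldl_cons]
    have hstep : (if String.singleton c ∈ (["a", "e", "i", "o", "u"] : List String) then
        if String.singleton c ∈ acc.map String.singleton then acc.map String.singleton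
        else acc.map String.singleton ++ [String.singleton c]
      else acc.map String.singleton) = (stepC acc c).map String.singleton := by
      unfold stepC
      by_cases hv : c ∈ vchars
      · rw [if_pos ((singleton_mem_vowels c).2 hv), if_pos hv]
        by_cases hm : c ∈ acc
        · rw [if_pos ((singleton_mem_map c acc).2 hm), if_pos hm]
        · rw [if_neg (fun h => hm ((singleton_mem_map c acc).1 h)), if_neg hm, List.map_append]
          rfl
      · rw [if_neg (fun h => hv ((singleton_mem_vowels c).1 h)), if_neg hv]
    rw [hstep, ih]

theorem foldC_eq (l : List Char) (acc : List Char) :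
    l.foldl stepC acc = acc ++ (dedupV l).filter (fun x => x ∉ acc) := by
  induction l generalizing acc with
  | nil => simp [dedupV]
  | cons c t ih =>
    simp only [List.foldl_cons]
    by_cases hv : c ∈ vchars
    · simp only [dedupV, if_pos hv]
      by_cases hm : c ∈ acc
      · rw [show stepC acc c = acc by simp [stepC, hv, hm]]
        rw [ih]
        congr 1
        rw [List.filter_cons, if_neg (by simp [hm]), List.filter_filter]
        apply List.filter_congr
        intro x _
        by_cases hx : x = c
        · subst hx; simp [hm]
        · simp [hx]
      · rw [show stepC acc c = acc ++ [c] by simp [stepC, hv, hm]]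
        rw [ih]
        rw [List.filter_cons, if_pos (by simp [hm]), List.filter_filter]
        simp only [List.append_assoc, List.singleton_append]
        congr 2
        apply List.filter_congr
        intro x _
        by_cases hx : x = c
        · subst hx; simp
        · simp [hx, List.mem_append]
    · rw [show stepC acc c = acc by simp [stepC, hv]]
      rw [ih]
      simp only [dedupV, if_neg hv]

theorem A_eq (phrase : String) :
    print_vowels phrase = (dedupV phrase.toList).map String.singleton := by
  unfold print_vowels
  have h := foldA_map phrase.toList []
  simp only [List.map_nil] at h
  rw [h, foldC_eq]
  simp

theorem mem_dedupV (x : Char) (l : List Char) : x ∈ dedupV l ↔ x ∈ vchars ∧ x ∈ l := by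
  induction l with
  | nil => simp [dedupV]
  | cons c t ih =>
    by_cases hc : c ∈ vchars
    · simp [dedupV, hc, List.mem_filter, ih]
      by_cases hx : x = c
      · subst hx; tauto
      · tauto
    · simp [dedupV, hc, ih]
      by_cases hx : x = c
      · subst hx; tauto
      · tauto

theorem nodup_dedupV (l : List Char) : (dedupV l).Nodup := by
  induction l with
  | nil => simp [dedupV]
  | cons c t ih =>
    by_cases hc : c ∈ vchars
    · simp only [dedupV, if_pos hc, List.nodup_cons]
      refine ⟨?_, ih.filter _⟩
      simp [List.mem_filter]
    · simpa [dedupV, hc] using ih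

theorem pairwise_dedupV (l : List Char) :
    (dedupV l).Pairwise (fun a b => l.idxOf a < l.idxOf b) := by
  induction l with
  | nil => simp [dedupV]
  | cons c t ih =>
    by_cases hc : c ∈ vchars
    · simp only [dedupV, if_pos hc]
      refine List.pairwise_cons.2 ⟨?_, ?_⟩
      · intro b hb
        have hbc : b ≠ c := by simpa using (List.of_mem_filter hb)
        rw [List.idxOf_cons_self, List.idxOf_cons_ne _ (Ne.symm hbc)]
        omega
      · have hp : ((dedupV t).filter (fun x => x ≠ c)).Pairwise
            (fun a b => t.idxOf a < t.idxOf b) :=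
          List.Pairwise.sublist List.filter_sublist ih
        refine hp.imp_of_mem ?_
        intro a b ha hb hab
        have hac : a ≠ c := by simpa using (List.of_mem_filter ha)
        have hbc : b ≠ c := by simpa using (List.of_mem_filter hb)
        rw [List.idxOf_cons_ne _ (Ne.symm hac), List.idxOf_cons_ne _ (Ne.symm hbc)]
        omega
    · simp only [dedupV, if_neg hc]
      refine ih.imp_of_mem ?_
      intro a b ha hb hab
      have hac : a ≠ c := fun h => hc (h ▸ (mem_dedupV a t).1 ha).1
      have hbc : b ≠ c := fun h => hc (h ▸ (mem_dedupV b t).1 hb).1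
      rw [List.idxOf_cons_ne _ (Ne.symm hac), List.idxOf_cons_ne _ (Ne.symm hbc)]
      omega

theorem singleton_infix_iff (c : Char) (l : List Char) : [c] <:+: l ↔ c ∈ l := by
  constructor
  · intro h; exact List.singleton_sublist.1 h.sublist
  · intro h
    obtain ⟨s, t, rfl⟩ := List.append_of_mem h
    exact ⟨s, t, by simp⟩

theorem find_singleton_mem (l : List Char) (c : Char) (h : c ∈ l) :
    PySem.Chars.find l [c] = (l.idxOf c : Int) := by
  have hin : [c] <:+: l := (singleton_infix_iff c l).2 h
  have h0 : 0 ≤ PySem.Chars.find l [c] := (PySem.Chars.find_nonneg_iff _ _).2 hin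
  obtain ⟨hpre, hmin⟩ := PySem.Chars.find_spec h0
  set n := (PySem.Chars.find l [c]).toNat with hn
  obtain ⟨r, hr⟩ := hpre
  have hnl : n < l.length := by
    by_contra hcon
    have hd : l.drop n = [] := List.drop_eq_nil_of_le (by omega)
    rw [← hr] at hd; simp at hd
  have hgn : l[n] = c := by
    have := List.drop_eq_getElem_cons hnl
    rw [this] at hr
    exact (List.cons.injEq _ _ _ _ ▸ hr : _) |>.1.symm
  have hlt : ∀ j (hj : j < n), l[j]'(Nat.lt_trans hj hnl) ≠ c := by
    intro j hj he
    apply hmin j hj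
    have hjl : j < l.length := by omega
    refine ⟨l.drop (j+1), ?_⟩
    rw [List.drop_eq_getElem_cons hjl, he]
    rfl
  have hidx : List.idxOf? c l = some n :=
    List.idxOf?_eq_some_iff.2 ⟨hnl, hgn, fun j hj => hlt j hj⟩
  have : l.idxOf c = n := by
    rw [List.idxOf_eq_getD_idxOf?, hidx]; rfl
  rw [this, hn, Int.toNat_of_nonneg h0]

theorem B_eq (phrase : String) :
    print_vowels_alt phrase = (dedupV phrase.toList).map String.singleton := by
  set l := phrase.toList with hl
  have hfun : (fun (ps : List (Int × String)) (v : String) =>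
        if PySem.Str.find phrase v ≠ -1 then ps ++ [(PySem.Str.find phrase v, v)] else ps)
      = (fun (ps : List (Int × String)) (v : String) =>
        if (fun v => decide (PySem.Str.find phrase v ≠ -1)) v = true then
          ps ++ [(fun v => (PySem.Str.find phrase v, v)) v] else ps) := by
    funext ps v; simp
  have hpairs : (["a", "e", "i", "o", "u"] : List String).foldl (fun pairs vowel =>
      if PySem.Str.find phrase vowel ≠ -1 then
        pairs ++ [(PySem.Str.find phrase vowel, vowel)]
      else pairs) []
      = ((["a", "e", "i", "o", "u"] : List String).filter
          (fun v => decide (PySem.Str.find phrase v ≠ -1))).map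
          (fun v => (PySem.Str.find phrase v, v)) := by
    rw [hfun, PySem.List.foldl_append_if]
    rfl
  have hsv : (["a", "e", "i", "o", "u"] : List String) = vchars.map String.singleton := by
    decide
  have hfind : ∀ c : Char, (PySem.Str.find phrase (String.singleton c) ≠ -1) ↔ c ∈ l := by
    intro c
    rw [PySem.Str.find_eq, String.toList_singleton, ← hl]
    simp [Ne, PySem.Chars.find_eq_neg_one_iff, singleton_infix_iff]
  have hpairs2 : (["a", "e", "i", "o", "u"] : List String).foldl (fun pairs vowel =>
      if PySem.Str.find phrase vowel ≠ -1 then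
        pairs ++ [(PySem.Str.find phrase vowel, vowel)]
      else pairs) []
      = (vchars.filter (fun c => decide (c ∈ l))).map
          (fun c => ((l.idxOf c : Int), String.singleton c)) := by
    rw [hpairs, hsv, List.filter_map, List.map_map]
    have hfc : ∀ x ∈ vchars, ((fun v => decide (PySem.Str.find phrase v ≠ -1)) ∘ String.singleton) x
        = (fun c => decide (c ∈ l)) x := by
      intro x _
      simp only [Function.comp_apply, decide_eq_decide]
      exact hfind x
    rw [List.filter_congr hfc]
    apply List.map_congr_left
    intro c hc
    have hcl : c ∈ l := by simpa using List.of_mem_filter hc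
    simp only [Function.comp_apply, PySem.Str.find_eq, String.toList_singleton, ← hl,
      find_singleton_mem l c hcl]
  have hperm : ((dedupV l).map (fun c => ((l.idxOf c : Int), String.singleton c))).Perm
      ((vchars.filter (fun c => decide (c ∈ l))).map
        (fun c => ((l.idxOf c : Int), String.singleton c))) := by
    apply List.Perm.map
    rw [List.perm_ext_iff_of_nodup (nodup_dedupV l) (List.Nodup.filter _ (by decide))]
    intro a
    simp [mem_dedupV, List.mem_filter]
  have hpw : ((dedupV l).map (fun c => ((l.idxOf c : Int), String.singleton c))).Pairwise
      (fun p q => p.1 < q.1) := by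
    rw [List.pairwise_map]
    refine (pairwise_dedupV l).imp ?_
    intro a b h
    show ((l.idxOf a : Int)) < ((l.idxOf b : Int))
    exact_mod_cast h
  simp only [print_vowels_alt]
  rw [hpairs2, PySem.List.sorted_eq_of_perm_of_pairwise_lt _ _ _ hperm hpw, List.map_map]
  rfl

-- ===== VERDICT (by name: the statement is the Claim_ definition above) =====
theorem print_vowels_spec : Claim_equal_print_vowels := by
  intro phrase _
  unfold Spec_print_vowels
  rw [A_eq, B_eq]
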